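-- pv_equiv track=rewrite | github.com/sketchmind/dolphinscheduler-cli | tests/services/test_surface_quality.py | _longest_known_command_path
-- ===== SOURCE A (Python) =====
-- SurfacePath = tuple[str, ...]
--
-- def _longest_known_command_path(
--     tokens: list[str],
--     known_paths: set[SurfacePath],
-- ) -> SurfacePath | None:
--     for length in range(len(tokens), 0, -1):
--         candidate = tuple(tokens[:length])
--         if candidate in known_paths:
--             return candidate
--     return None
-- ===== SOURCE B (Python) =====
-- def _longest_known_command_path(tokens, known_paths):
--     best = None
--     prefix = ()
--     for tok in tokens:
--         prefix = prefix + (tok,)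
--         if prefix in known_paths:
--             best = prefix
--     return best
-- ===== Notes on version B (the rewrite author's own statement) =====
-- stated objective: alternative
-- what changed: Replaces the longest-to-shortest search with early return and repeated slicing by a single forward pass that grows the prefix one token at a time and keeps the last (longest) prefix found in known_paths.
import Mathlib
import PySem

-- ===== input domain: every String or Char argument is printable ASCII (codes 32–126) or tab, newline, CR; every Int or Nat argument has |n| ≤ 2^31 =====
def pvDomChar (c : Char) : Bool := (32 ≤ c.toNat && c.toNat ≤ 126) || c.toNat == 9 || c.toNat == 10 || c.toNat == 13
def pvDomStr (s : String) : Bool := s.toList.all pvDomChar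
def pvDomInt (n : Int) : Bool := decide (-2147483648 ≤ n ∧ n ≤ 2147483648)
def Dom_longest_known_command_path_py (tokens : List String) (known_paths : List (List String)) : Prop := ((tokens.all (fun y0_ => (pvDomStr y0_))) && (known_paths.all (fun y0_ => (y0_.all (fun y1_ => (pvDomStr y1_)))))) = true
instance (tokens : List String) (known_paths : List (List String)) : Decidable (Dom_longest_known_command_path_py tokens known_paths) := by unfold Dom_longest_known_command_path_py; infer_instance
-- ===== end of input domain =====

-- B replaces A's longest-to-shortest prefix search (re-slicing tokens[:length] each step) with one forward pass that grows the prefix and keeps the last match; objective: alternative decomposition, same result.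


-- ===== PORT A =====
-- A loops length = n, n-1, ..., 1 (range(len(tokens), 0, -1)), returning the first
-- prefix tokens[:length] found in known_paths; ported as a countdown recursion on length.
def pvGoA (tokens : List String) (known_paths : List (List String)) : Nat → Option (List String)
  | 0 => none
  | k + 1 =>
    let candidate := tokens.take (k + 1)
    if candidate ∈ known_paths then some candidate else pvGoA tokens known_paths k

def longest_known_command_path_py (tokens : List String) (known_paths : List (List String)) : Option (List String) :=
  pvGoA tokens known_paths tokens.length

-- ===== PORT B =====
-- B: single forward pass, growing the prefix and overwriting best on every hit.
def pvAltStep (known_paths : List (List String)) (st : Option (List String) × List String) (tok : String) : Option (List String) × List String :=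
  let pr := st.2 ++ [tok]
  if pr ∈ known_paths then (some pr, pr) else (st.1, pr)

def longest_known_command_path_py_alt (tokens : List String) (known_paths : List (List String)) : Option (List String) :=
  (tokens.foldl (pvAltStep known_paths) (none, [])).1

-- ===== PRECONDITION & SPEC =====
def Spec_longest_known_command_path_py (tokens : List String) (known_paths : List (List String)) (out : Option (List String)) : Prop := out = longest_known_command_path_py_alt tokens known_paths
instance (tokens : List String) (known_paths : List (List String)) (out : Option (List String)) : Decidable (Spec_longest_known_command_path_py tokens known_paths out) := by unfold Spec_longest_known_command_path_py; infer_instance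

-- ===== CLAIM (what is proved, stated in full; the proofs are below) =====
def Claim_equal_longest_known_command_path_py : Prop := ∀ (tokens : List String) (known_paths : List (List String)), Dom_longest_known_command_path_py tokens known_paths → Spec_longest_known_command_path_py tokens known_paths (longest_known_command_path_py tokens known_paths)

-- ===== LEMMAS AND PROOFS =====

-- Appending a token does not change A's search over lengths ≤ the old length.
theorem pvGoA_append (ts : List String) (t : String) (kp : List (List String)) (k : Nat)
    (h : k ≤ ts.length) : pvGoA (ts ++ [t]) kp k = pvGoA ts kp k := by
  induction k with
  | zero => rfl
  | succ k ih =>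
    simp only [pvGoA, List.take_append_of_le_length h]
    rw [ih (Nat.le_of_succ_le h)]

-- The second component of B's fold state is the consumed prefix.
theorem pvAlt_snd (kp : List (List String)) (ts : List String) (b : Option (List String)) (p : List String) :
    (ts.foldl (pvAltStep kp) (b, p)).2 = p ++ ts := by
  induction ts generalizing b p with
  | nil => simp
  | cons t ts ih =>
    simp only [List.foldl_cons, pvAltStep]
    split <;> simp [ih]

theorem pvMain (kp : List (List String)) (ts : List String) :
    pvGoA ts kp ts.length = (ts.foldl (pvAltStep kp) (none, [])).1 := by
  induction ts using List.reverseRecOn with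
  | nil => rfl
  | append_singleton ts t ih =>
    rw [List.foldl_append]
    have hsnd := pvAlt_snd kp ts none []
    simp only [List.nil_append] at hsnd
    have htake : (ts ++ [t]).take (ts.length + 1) = ts ++ [t] :=
      List.take_of_length_le (by simp)
    simp only [List.length_append, List.length_singleton, pvGoA, htake]
    rw [pvGoA_append ts t kp ts.length (Nat.le_refl _), ih]
    simp only [List.foldl_cons, List.foldl_nil, pvAltStep, hsnd]
    split <;> rfl

-- ===== VERDICT (by name: the statement is the Claim_ definition above) =====
theorem longest_known_command_path_py_spec : Claim_equal_longest_known_command_path_py := by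
  intro tokens known_paths _
  unfold Spec_longest_known_command_path_py longest_known_command_path_py longest_known_command_path_py_alt
  exact pvMain known_paths tokens
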